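-- pv_equiv track=rewrite | github.com/WindzJC/leadautomation | verify_emails.py | is_role_address
-- ===== SOURCE A (Python) =====
-- SOFT_ROLE_LOCALPARTS = {
--     "admin",
--     "support",
--     "info",
--     "sales",
--     "billing",
--     "contact",
--     "help",
--     "team",
--     "office",
--     "hello",
--     "marketing",
--     "privacy",
--     "legal",
-- }
--
-- HARD_BLOCK_ROLE_LOCALPARTS = {
--     "abuse",
--     "postmaster",
--     "noreply",
--     "no-reply",
--     "donotreply",
--     "do-not-reply",
-- }
--
-- def local_from_email(email: str) -> str:
--     local, _, _ = email.partition("@")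
--     return local.strip().lower()
--
-- def is_role_address(email: str) -> bool:
--     local = local_from_email(email)
--     all_roles = SOFT_ROLE_LOCALPARTS | HARD_BLOCK_ROLE_LOCALPARTS
--     if local in all_roles:
--         return True
--     for role in all_roles:
--         if local.startswith(role) and len(local) > len(role):
--             sep = local[len(role)]
--             if sep in {".", "-", "_", "+"}:
--                 return True
--     return False
-- ===== SOURCE B (Python) =====
-- SOFT_ROLE_LOCALPARTS = {
--     "admin", "support", "info", "sales", "billing", "contact", "help",
--     "team", "office", "hello", "marketing", "privacy", "legal",
-- }
--
-- HARD_BLOCK_ROLE_LOCALPARTS = {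
--     "abuse", "postmaster", "noreply", "no-reply", "donotreply", "do-not-reply",
-- }
--
-- SEPARATORS = {".", "-", "_", "+"}
--
-- def is_role_address(email: str) -> bool:
--     local = email.partition("@")[0].strip().lower()
--     all_roles = SOFT_ROLE_LOCALPARTS | HARD_BLOCK_ROLE_LOCALPARTS
--     if local in all_roles:
--         return True
--     # instead of scanning every role with startswith, test each
--     # separator-delimited prefix of local with one set lookup
--     for i in range(len(local)):
--         if local[i] in SEPARATORS and local[:i] in all_roles:
--             return True
--     return False
-- ===== Notes on version B (the rewrite author's own statement) =====
-- stated objective: alternative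
-- what changed: Instead of scanning each of the 19 roles with startswith and indexing past it, B loops once over the positions of the local part and, at each separator character, tests the preceding prefix for set membership.
import Mathlib
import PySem

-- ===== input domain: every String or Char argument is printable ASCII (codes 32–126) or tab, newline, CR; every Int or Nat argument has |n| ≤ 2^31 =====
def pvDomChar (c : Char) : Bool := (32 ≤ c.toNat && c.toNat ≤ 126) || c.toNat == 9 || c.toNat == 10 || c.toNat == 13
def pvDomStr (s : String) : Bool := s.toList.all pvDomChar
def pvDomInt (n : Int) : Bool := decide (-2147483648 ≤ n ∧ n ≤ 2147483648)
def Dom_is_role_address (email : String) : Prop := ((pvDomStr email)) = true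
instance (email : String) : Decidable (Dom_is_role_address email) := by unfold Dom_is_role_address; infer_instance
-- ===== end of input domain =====

-- B loops once over the positions of the local part and tests each separator-delimited
-- prefix by set membership, instead of scanning every role with startswith (alternative).

-- module-level constants shared by both Pythons: SOFT_ROLE_LOCALPARTS | HARD_BLOCK_ROLE_LOCALPARTS
-- (a Python set of strings; the loop result is order-independent, fixed here in literal order)
def pvAllRoles : List (List Char) :=
  ["admin".toList, "support".toList, "info".toList, "sales".toList, "billing".toList,
   "contact".toList, "help".toList, "team".toList, "office".toList, "hello".toList,
   "marketing".toList, "privacy".toList, "legal".toList,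
   "abuse".toList, "postmaster".toList, "noreply".toList, "no-reply".toList,
   "donotreply".toList, "do-not-reply".toList]

-- ===== PORT A =====
-- email.partition("@")[0] is exactly the prefix of email before the first '@' (whole
-- string when '@' is absent): ported by hand as takeWhile (· ≠ '@'), exact on all inputs.
def local_from_email (email : String) : List Char :=
  PySem.Chars.lower (PySem.Chars.strip (email.toList.takeWhile (· ≠ '@')))

-- for role in all_roles: startswith + length check + separator test
def pvALoop (l : List Char) : List (List Char) → Bool
  | [] => false
  | r :: rs =>
      if PySem.Chars.startswith l r && decide (l.length > r.length) &&
         (l[r.length]?).any (fun sep => sep == '.' || sep == '-' || sep == '_' || sep == '+') then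
        true
      else pvALoop l rs

def is_role_address (email : String) : Bool :=
  let loc := local_from_email email
  if loc ∈ pvAllRoles then true
  else pvALoop loc pvAllRoles

-- ===== PORT B =====
-- for i in range(len(local)): if local[i] in SEPARATORS and local[:i] in all_roles
def pvBLoop (l : List Char) (i : Nat) : Bool :=
  if h : i < l.length then
    if (l[i] == '.' || l[i] == '-' || l[i] == '_' || l[i] == '+') &&
       decide (l.take i ∈ pvAllRoles) then
      true
    else pvBLoop l (i + 1)
  else false
termination_by l.length - i

def is_role_address_alt (email : String) : Bool :=
  let loc := PySem.Chars.lower (PySem.Chars.strip (email.toList.takeWhile (· ≠ '@')))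
  if loc ∈ pvAllRoles then true
  else pvBLoop loc 0

-- ===== PRECONDITION & SPEC =====
def Spec_is_role_address (email : String) (out : Bool) : Prop := out = is_role_address_alt email
instance (email : String) (out : Bool) : Decidable (Spec_is_role_address email out) := by unfold Spec_is_role_address; infer_instance

-- ===== CLAIM (what is proved, stated in full; the proofs are below) =====
def Claim_equal_is_role_address : Prop := ∀ (email : String), Dom_is_role_address email → Spec_is_role_address email (is_role_address email)

-- ===== LEMMAS AND PROOFS =====

def pvIsSep (c : Char) : Bool := c == '.' || c == '-' || c == '_' || c == '+'

theorem pvALoop_iff (l : List Char) (roles : List (List Char)) :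
    pvALoop l roles = true ↔
      ∃ r ∈ roles, r <+: l ∧ r.length < l.length ∧ (l[r.length]?).any pvIsSep = true := by
  induction roles with
  | nil => simp [pvALoop]
  | cons r rs ih =>
    rw [pvALoop]
    split
    · rename_i h
      simp only [Bool.and_eq_true, decide_eq_true_eq, PySem.Chars.startswith_iff] at h
      simp only [true_iff]
      exact ⟨r, by simp, h.1.1, h.1.2, h.2⟩
    · rename_i h
      rw [ih]
      constructor
      · rintro ⟨r', hr', hp, hlen, hsep⟩; exact ⟨r', by simp [hr'], hp, hlen, hsep⟩
      · rintro ⟨r', hr', hp, hlen, hsep⟩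
        rcases List.mem_cons.1 hr' with rfl | hmem
        · exact absurd (by
            simp only [Bool.and_eq_true, decide_eq_true_eq, PySem.Chars.startswith_iff]
            exact ⟨⟨hp, hlen⟩, by simpa [pvIsSep] using hsep⟩) h
        · exact ⟨r', hmem, hp, hlen, hsep⟩

theorem pvBLoop_iff (l : List Char) (i : Nat) :
    pvBLoop l i = true ↔
      ∃ j, i ≤ j ∧ j < l.length ∧ (l[j]?).any pvIsSep = true ∧ l.take j ∈ pvAllRoles := by
  rw [pvBLoop]
  split
  · rename_i h
    split
    · rename_i hc
      simp only [Bool.and_eq_true, decide_eq_true_eq] at hc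
      simp only [true_iff]
      refine ⟨i, le_refl i, h, ?_, hc.2⟩
      rw [List.getElem?_eq_getElem h]
      simpa [pvIsSep] using hc.1
    · rename_i hc
      rw [pvBLoop_iff l (i + 1)]
      constructor
      · rintro ⟨j, hij, hj, hs, hm⟩; exact ⟨j, Nat.le_of_succ_le hij, hj, hs, hm⟩
      · rintro ⟨j, hij, hj, hs, hm⟩
        rcases Nat.lt_or_ge i j with hlt | hge
        · exact ⟨j, hlt, hj, hs, hm⟩
        · have hij' : i = j := Nat.le_antisymm hij hge
          subst hij'
          rw [List.getElem?_eq_getElem h] at hs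
          exact absurd (by
            simp only [Bool.and_eq_true, decide_eq_true_eq]
            exact ⟨by simpa [pvIsSep] using hs, hm⟩) hc
  · rename_i h
    simp only [Bool.false_eq_true, false_iff]
    rintro ⟨j, hij, hj, _, _⟩
    exact h (Nat.lt_of_le_of_lt hij hj)
termination_by l.length - i

theorem pvLoops_agree (l : List Char) : pvALoop l pvAllRoles = pvBLoop l 0 := by
  rw [Bool.eq_iff_iff, pvALoop_iff, pvBLoop_iff]
  constructor
  · rintro ⟨r, hr, hp, hlen, hsep⟩
    refine ⟨r.length, Nat.zero_le _, hlen, hsep, ?_⟩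
    obtain ⟨t, rfl⟩ := hp
    rwa [List.take_left]
  · rintro ⟨j, _, hj, hs, hm⟩
    have hlen : (l.take j).length = j := by
      simp [List.length_take, Nat.min_eq_left (Nat.le_of_lt hj)]
    exact ⟨l.take j, hm, List.take_prefix j l, by rw [hlen]; exact hj, by rw [hlen]; exact hs⟩

-- ===== VERDICT (by name: the statement is the Claim_ definition above) =====
theorem is_role_address_spec : Claim_equal_is_role_address := by
  intro email _
  unfold Spec_is_role_address is_role_address is_role_address_alt local_from_email
  simp only []
  split
  · rfl
  · exact pvLoops_agree _
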